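-- pv_equiv track=rewrite | github.com/mikechesterwang/Collection | max_continue_1_string.py | num_max_continue_string
-- ===== SOURCE A (Python) =====
-- def num_max_continue_string(n, k=5):
--     def _num_max_continue_string(n, ans, k):
--         if n < k:
--             return 0
--         if n == k:
--             return 1
--         if ans[n] != 0:
--             return ans[n]
--         cnt = 0
--         d = n - (k + 1)
--         cnt += 1 << (n - k)
--         for c in range(0, d + 1):
--             cnt += ((1 << c) - _num_max_continue_string(c, ans, k)) * (1 << (d - c))
--         ans[n] = cnt
--         return cnt
--     return _num_max_continue_string(n, [0 for _ in range(n + 1)], k)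
-- ===== SOURCE B (Python) =====
-- def num_max_continue_string(n, k=5):
--     # Bottom-up DP with a running accumulator S(d) = 2*S(d-1) + (2^d - f(d)).
--     # Only f(0..n-k-1) is ever read back, so only that prefix is stored.
--     if n < k:
--         return 0
--     if n == k:
--         return 1
--     D = n - k
--     f = [0] * D
--     if k < D:
--         f[k] = 1
--     S = 0
--     last = 0
--     for i in range(k + 1, n + 1):
--         d = i - k - 1
--         S = 2 * S + ((1 << d) - f[d])
--         last = (1 << (i - k)) + S
--         if i < D:
--             f[i] = last
--     return last
-- ===== Notes on version B (the rewrite author's own statement) =====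
-- stated objective: faster
-- what changed: Replaces A's memoized top-down recursion, which re-evaluates an O(n)-term inner summation, by a single bottom-up loop maintaining the running accumulator S(d) = 2*S(d-1) + (2^d - f(d)) and storing only the f-prefix that is ever read back, so each value costs O(1) bignum operations.
import Mathlib
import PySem

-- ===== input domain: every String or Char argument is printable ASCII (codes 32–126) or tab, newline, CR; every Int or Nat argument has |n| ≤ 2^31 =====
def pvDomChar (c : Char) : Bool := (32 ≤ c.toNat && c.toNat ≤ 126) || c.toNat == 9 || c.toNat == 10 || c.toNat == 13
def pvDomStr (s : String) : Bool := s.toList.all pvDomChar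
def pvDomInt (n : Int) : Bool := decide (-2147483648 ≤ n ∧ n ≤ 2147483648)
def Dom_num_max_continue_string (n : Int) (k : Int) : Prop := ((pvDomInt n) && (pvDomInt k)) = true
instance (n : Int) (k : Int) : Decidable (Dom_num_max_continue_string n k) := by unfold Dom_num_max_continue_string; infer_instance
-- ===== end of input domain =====

-- B replaces A's memoized recursion (which re-sums an O(n) inner loop for every n) by a
-- single forward DP loop maintaining a running accumulator S(d) = 2*S(d-1) + (2^d - f(d)).

-- ===== PORT A =====
-- A's inner recursive helper `_num_max_continue_string(n, ans, k)`, with the mutated memo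
-- list `ans` threaded through explicitly; `fuel` only makes the recursion total (Python's
-- recursion is well-founded on every input Pre_ admits).  `1 << e` is ported as `1 <<< e.toNat`
-- (exact: every shift amount reached under Pre_ is nonnegative).
def pvAgo (k : Int) : Nat → Int → List Int → Int × List Int
  | 0, _, ans => (0, ans)                                -- fuel exhausted: unreachable under Pre_
  | fuel + 1, n, ans =>
    if n < k then (0, ans)
    else if n = k then (1, ans)
    else if PySem.List.pyGetD ans n 0 ≠ 0 then (PySem.List.pyGetD ans n 0, ans)
    else
      let d := n - (k + 1)
      let r := (PySem.List.pyRange 0 (d + 1) 1).foldl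
        (fun (st : Int × List Int) c =>
          let p := pvAgo k fuel c st.2
          (st.1 + ((1 : Int) <<< c.toNat - p.1) * ((1 : Int) <<< (d - c).toNat), p.2))
        ((0 : Int) + (1 : Int) <<< (n - k).toNat, ans)
    (r.1, PySem.List.pySetD r.2 n r.1)                   -- ans[n] = cnt

def num_max_continue_string (n : Int) (k : Int) : Int :=
  (pvAgo k (n.toNat + 2) n (List.replicate (n + 1).toNat 0)).1

-- ===== PORT B =====
-- B's loop body on state ((f, S), last):
--   d = i-k-1; S = 2*S + ((1 << d) - f[d]); last = (1 << (i-k)) + S; if i < D: f[i] = last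
def pvBstep (k : Int) (D : Int) (st : (List Int × Int) × Int) (i : Int) : (List Int × Int) × Int :=
  let d := i - k - 1
  let S := 2 * st.1.2 + ((1 : Int) <<< d.toNat - PySem.List.pyGetD st.1.1 d 0)
  let last := (1 : Int) <<< (i - k).toNat + S
  ((if i < D then PySem.List.pySetD st.1.1 i last else st.1.1, S), last)

def num_max_continue_string_alt (n : Int) (k : Int) : Int :=
  if n < k then 0
  else if n = k then 1
  else
    let D := n - k
    let f0 := if k < D then PySem.List.pySetD (List.replicate D.toNat 0) k 1
              else List.replicate D.toNat 0                                   -- f = [0]*D; if k < D: f[k] = 1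
    ((PySem.List.pyRange (k + 1) (n + 1) 1).foldl (pvBstep k D) ((f0, 0), 0)).2  -- return last

-- ===== PRECONDITION & SPEC =====
-- Pre_ excludes only inputs on which A does not return: for k < 0 < n - k the Python
-- recursion `_num_max_continue_string` never terminates (RecursionError).
def Pre_num_max_continue_string (n : Int) (k : Int) : Prop := 0 ≤ k ∨ n ≤ k
instance (n : Int) (k : Int) : Decidable (Pre_num_max_continue_string n k) := by
  unfold Pre_num_max_continue_string; infer_instance

def pvWitness_num_max_continue_string : Int × Int := (8, 2)

def Spec_num_max_continue_string (n : Int) (k : Int) (out : Int) : Prop := out = num_max_continue_string_alt n k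
instance (n : Int) (k : Int) (out : Int) : Decidable (Spec_num_max_continue_string n k out) := by unfold Spec_num_max_continue_string; infer_instance

-- ===== CLAIM (what is proved, stated in full; the proofs are below) =====
def Claim_equal_num_max_continue_string : Prop := ∀ (n : Int) (k : Int), Dom_num_max_continue_string n k → Pre_num_max_continue_string n k → Spec_num_max_continue_string n k (num_max_continue_string n k)

-- ===== LEMMAS AND PROOFS =====

-- The mathematical value both programs compute, by strong recursion.
def pvF (k : Int) (m : Nat) : Int :=
  if (m : Int) < k then 0
  else if (m : Int) = k then 1
  else 2 ^ (m - k.toNat) +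
    ((List.range (m - k.toNat)).attach.map
      (fun c => (2 ^ c.1 - pvF k c.1) * 2 ^ (m - k.toNat - 1 - c.1))).sum
termination_by m
decreasing_by
  have hc := List.mem_range.mp c.2
  omega

-- The partial sum B's accumulator maintains.
def pvS (k : Int) (D : Nat) : Int :=
  ((List.range D).map (fun c => (2 ^ c - pvF k c) * 2 ^ (D - 1 - c))).sum

theorem pvF_lt (k : Int) (m : Nat) (h : (m : Int) < k) : pvF k m = 0 := by
  rw [pvF]; simp [h]

theorem pvF_self (k : Int) (m : Nat) (h : (m : Int) = k) : pvF k m = 1 := by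
  rw [pvF]; simp [h]

theorem pvF_gt (k : Int) (m : Nat) (h : k < (m : Int)) :
    pvF k m = 2 ^ (m - k.toNat) + pvS k (m - k.toNat) := by
  rw [pvF, if_neg (by omega), if_neg (by omega), pvS]
  simp only [List.map_subtype, List.unattach_attach]

theorem pvS_succ (k : Int) (D : Nat) :
    pvS k (D + 1) = 2 * pvS k D + (2 ^ D - pvF k D) := by
  unfold pvS
  rw [List.range_succ, List.map_append, List.sum_append]
  have h1 : (List.range D).map (fun c => (2 ^ c - pvF k c) * 2 ^ (D + 1 - 1 - c))
      = (List.range D).map (fun c => 2 * ((2 ^ c - pvF k c) * 2 ^ (D - 1 - c))) := by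
    apply List.map_eq_map_iff.mpr
    intro c hc
    have hc' := List.mem_range.mp hc
    have he : D + 1 - 1 - c = (D - 1 - c) + 1 := by omega
    rw [he, pow_succ]; ring
  rw [h1, PySem.List.sum_map_const_mul_int]
  simp only [List.map_cons, List.map_nil, List.sum_cons, List.sum_nil]
  have : D + 1 - 1 - D = 0 := by omega
  rw [this]
  ring

-- Memo invariant: every nonzero entry of `ans` is the correct value for its index.
def pvInv (k : Int) (ans : List Int) : Prop :=
  ∀ (j : Nat) (v : Int), ans[j]? = some v → v ≠ 0 → v = pvF k j

theorem pvInv_set (k : Int) (ans : List Int) (hinv : pvInv k ans) (m : Nat) (v : Int)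
    (hv : v = pvF k m) : pvInv k (ans.set m v) := by
  intro j w hj hw
  rw [List.getElem?_set] at hj
  by_cases hmj : m = j
  · subst hmj
    by_cases hlen : m < ans.length
    · rw [if_pos rfl, if_pos hlen] at hj
      injection hj with h
      rw [← h, hv]
    · rw [if_pos rfl, if_neg hlen] at hj
      exact absurd hj (by simp)
  · rw [if_neg hmj] at hj
    exact hinv j w hj hw

-- A's inner loop: folding over a list of already-correct subproblems.
theorem pvAgo_fold (k : Int) (fuel : Nat) (d : Int)
    (IH : ∀ (c : Int) (ans : List Int), 0 ≤ c → c.toNat < fuel → pvInv k ans →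
      (pvAgo k fuel c ans).1 = pvF k c.toNat ∧ pvInv k (pvAgo k fuel c ans).2) :
    ∀ (L : List Int), (∀ c ∈ L, 0 ≤ c ∧ c.toNat < fuel) → ∀ (acc : Int) (ans : List Int), pvInv k ans →
      (L.foldl (fun (st : Int × List Int) c =>
          let p := pvAgo k fuel c st.2
          (st.1 + ((1 : Int) <<< c.toNat - p.1) * ((1 : Int) <<< (d - c).toNat), p.2)) (acc, ans)).1
        = acc + (L.map (fun c => (2 ^ c.toNat - pvF k c.toNat) * 2 ^ (d - c).toNat)).sum
      ∧ pvInv k (L.foldl (fun (st : Int × List Int) c =>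
          let p := pvAgo k fuel c st.2
          (st.1 + ((1 : Int) <<< c.toNat - p.1) * ((1 : Int) <<< (d - c).toNat), p.2)) (acc, ans)).2 := by
  intro L
  induction L with
  | nil => intro _ acc ans hinv; exact ⟨by simp, by simpa using hinv⟩
  | cons c L ihL =>
    intro hL acc ans hinv
    obtain ⟨hc0, hcf⟩ := hL c (by simp)
    obtain ⟨hv, hinv'⟩ := IH c ans hc0 hcf hinv
    simp only [List.foldl_cons, List.map_cons, List.sum_cons]
    have hrec := ihL (fun x hx => hL x (by simp [hx]))
      (acc + ((1 : Int) <<< c.toNat - (pvAgo k fuel c ans).1) * ((1 : Int) <<< (d - c).toNat))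
      (pvAgo k fuel c ans).2 hinv'
    refine ⟨?_, hrec.2⟩
    rw [hrec.1, hv, Int.shiftLeft_eq, Int.shiftLeft_eq]
    ring

theorem pvAgo_correct (k : Int) (hk : 0 ≤ k) :
    ∀ (fuel : Nat) (n : Int) (ans : List Int), 0 ≤ n → n.toNat < fuel → pvInv k ans →
      (pvAgo k fuel n ans).1 = pvF k n.toNat ∧ pvInv k (pvAgo k fuel n ans).2 := by
  intro fuel
  induction fuel with
  | zero => intro n ans hn hf hinv; omega
  | succ fuel ih =>
    intro n ans hn hf hinv
    rw [pvAgo]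
    by_cases h1 : n < k
    · rw [if_pos h1]
      exact ⟨(pvF_lt k n.toNat (by omega)).symm, hinv⟩
    by_cases h2 : n = k
    · rw [if_neg h1, if_pos h2]
      exact ⟨(pvF_self k n.toNat (by omega)).symm, hinv⟩
    have hkn : k < n := by omega
    have hn1 : 1 ≤ n := by omega
    by_cases h3 : PySem.List.pyGetD ans n 0 ≠ 0
    · rw [if_neg h1, if_neg h2, if_pos h3]
      refine ⟨?_, hinv⟩
      show PySem.List.pyGetD ans n 0 = pvF k n.toNat
      rw [PySem.List.pyGetD_of_nonneg ans 0 hn, List.getD_eq_getElem?_getD] at h3 ⊢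
      cases hj : ans[n.toNat]? with
      | none => rw [hj] at h3; simp at h3
      | some v =>
        rw [hj] at h3
        simp only [Option.getD_some] at h3 ⊢
        exact hinv n.toNat v hj h3
    · rw [if_neg h1, if_neg h2, if_neg h3]
      have hfold := pvAgo_fold k fuel (n - (k + 1)) ih (PySem.List.pyRange 0 (n - (k + 1) + 1))
        (by
          intro c hc
          rw [PySem.List.mem_pyRange_one] at hc
          exact ⟨hc.1, by omega⟩)
        ((0 : Int) + (1 : Int) <<< (n - k).toNat) ans hinv
      have hsum : ((PySem.List.pyRange 0 (n - (k + 1) + 1)).map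
          (fun c => (2 ^ c.toNat - pvF k c.toNat) * 2 ^ ((n - (k + 1)) - c).toNat)).sum
          = pvS k (n.toNat - k.toNat) := by
        rw [PySem.List.pyRange_one, List.map_map, pvS]
        have hD : (n - (k + 1) + 1 - 0).toNat = n.toNat - k.toNat := by omega
        rw [hD]
        apply congrArg
        apply List.map_eq_map_iff.mpr
        intro t ht
        have ht' := List.mem_range.mp ht
        simp only [Function.comp]
        have e1 : ((0 : Int) + (t : Int)).toNat = t := by omega
        have e2 : ((n - (k + 1)) - ((0 : Int) + (t : Int))).toNat = n.toNat - k.toNat - 1 - t := by omega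
        rw [e1, e2]
      have hval : ((PySem.List.pyRange 0 (n - (k + 1) + 1)).foldl
            (fun (st : Int × List Int) c =>
              let p := pvAgo k fuel c st.2
              (st.1 + ((1 : Int) <<< c.toNat - p.1) * ((1 : Int) <<< ((n - (k + 1)) - c).toNat), p.2))
            ((0 : Int) + (1 : Int) <<< (n - k).toNat, ans)).1 = pvF k n.toNat := by
        rw [hfold.1, hsum, Int.shiftLeft_eq, pvF_gt k n.toNat (by omega)]
        have e3 : n.toNat - k.toNat = (n - k).toNat := by omega
        rw [e3]
        ring
      refine ⟨hval, ?_⟩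
      show pvInv k (PySem.List.pySetD ((PySem.List.pyRange 0 (n - (k + 1) + 1)).foldl
            (fun (st : Int × List Int) c =>
              let p := pvAgo k fuel c st.2
              (st.1 + ((1 : Int) <<< c.toNat - p.1) * ((1 : Int) <<< ((n - (k + 1)) - c).toNat), p.2))
            ((0 : Int) + (1 : Int) <<< (n - k).toNat, ans)).2 n ((PySem.List.pyRange 0 (n - (k + 1) + 1)).foldl
            (fun (st : Int × List Int) c =>
              let p := pvAgo k fuel c st.2
              (st.1 + ((1 : Int) <<< c.toNat - p.1) * ((1 : Int) <<< ((n - (k + 1)) - c).toNat), p.2))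
            ((0 : Int) + (1 : Int) <<< (n - k).toNat, ans)).1)
      rw [PySem.List.pySetD_of_nonneg _ _ hn]
      exact pvInv_set k _ hfold.2 n.toNat _ hval

theorem pvB_loop (n k : Int) (hk : 0 ≤ k) (hn : k < n) :
    ∀ (m : Nat), m ≤ n.toNat - k.toNat →
      ((((PySem.List.pyRange (k + 1) (k + 1 + m) 1).foldl (pvBstep k (n - k))
        ((if k < n - k then PySem.List.pySetD (List.replicate (n - k).toNat 0) k 1
          else List.replicate (n - k).toNat 0, 0), 0)).1.2 = pvS k m) ∧
      (((PySem.List.pyRange (k + 1) (k + 1 + m) 1).foldl (pvBstep k (n - k))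
        ((if k < n - k then PySem.List.pySetD (List.replicate (n - k).toNat 0) k 1
          else List.replicate (n - k).toNat 0, 0), 0)).2
        = if m = 0 then 0 else pvF k (k.toNat + m)) ∧
      (((PySem.List.pyRange (k + 1) (k + 1 + m) 1).foldl (pvBstep k (n - k))
        ((if k < n - k then PySem.List.pySetD (List.replicate (n - k).toNat 0) k 1
          else List.replicate (n - k).toNat 0, 0), 0)).1.1.length = (n - k).toNat) ∧
        ∀ j : Nat, j ≤ k.toNat + m → j < (n - k).toNat →
          ((PySem.List.pyRange (k + 1) (k + 1 + m) 1).foldl (pvBstep k (n - k))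
            ((if k < n - k then PySem.List.pySetD (List.replicate (n - k).toNat 0) k 1
              else List.replicate (n - k).toNat 0, 0), 0)).1.1[j]? = some (pvF k j)) := by
  intro m
  induction m with
  | zero =>
    intro _
    rw [PySem.List.pyRange_one_eq_nil (by simp)]
    simp only [List.foldl_nil]
    refine ⟨by simp [pvS], by simp, ?_, ?_⟩
    · by_cases hkD : k < n - k
      · rw [if_pos hkD, PySem.List.pySetD_of_nonneg _ _ hk]
        simp
      · rw [if_neg hkD]
        simp
    intro j hj hjD
    by_cases hkD : k < n - k
    · rw [if_pos hkD, PySem.List.pySetD_of_nonneg _ _ hk, List.getElem?_set]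
      by_cases hjk : j = k.toNat
      · rw [if_pos hjk.symm, if_pos (by simp; omega)]
        rw [pvF_self k j (by omega)]
      · rw [if_neg (fun h => hjk h.symm), List.getElem?_replicate, if_pos (by omega)]
        rw [pvF_lt k j (by omega)]
    · rw [if_neg hkD, List.getElem?_replicate, if_pos (by omega)]
      rw [pvF_lt k j (by omega)]
  | succ m ihm =>
    intro hm
    have hm' : m ≤ n.toNat - k.toNat := by omega
    obtain ⟨hS, hlast, hL, hE⟩ := ihm hm'
    have hsplit : (k + 1 + ((m : Nat) + 1 : Nat) : Int) = (k + 1 + m) + 1 := by push_cast; ring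
    rw [hsplit, PySem.List.pyRange_one_succ_right (by omega), List.foldl_append, List.foldl_cons,
      List.foldl_nil]
    set st := (PySem.List.pyRange (k + 1) (k + 1 + (m : Int)) 1).foldl (pvBstep k (n - k))
        ((if k < n - k then PySem.List.pySetD (List.replicate (n - k).toNat 0) k 1
          else List.replicate (n - k).toNat 0, 0), 0) with hst
    have hd : (k + 1 + (m : Int)) - k - 1 = (m : Int) := by ring
    have hread : PySem.List.pyGetD st.1.1 ((k + 1 + (m : Int)) - k - 1) 0 = pvF k m := by
      rw [hd, PySem.List.pyGetD_of_nonneg _ _ (by positivity), List.getD_eq_getElem?_getD]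
      have := hE m (by omega) (by omega)
      simp only [Int.toNat_natCast]
      rw [this, Option.getD_some]
    have hS' : (pvBstep k (n - k) st (k + 1 + m)).1.2 = pvS k (m + 1) := by
      show 2 * st.1.2 + ((1 : Int) <<< ((k + 1 + (m : Int)) - k - 1).toNat
          - PySem.List.pyGetD st.1.1 ((k + 1 + (m : Int)) - k - 1) 0) = pvS k (m + 1)
      rw [hread, hS, hd, Int.shiftLeft_eq, pvS_succ]
      simp
    have hvalF : (1 : Int) <<< ((k + 1 + (m : Int)) - k).toNat + (pvBstep k (n - k) st (k + 1 + m)).1.2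
        = pvF k (k.toNat + (m + 1)) := by
      rw [hS', Int.shiftLeft_eq, pvF_gt k (k.toNat + (m + 1)) (by omega)]
      have e1 : ((k + 1 + (m : Int)) - k).toNat = m + 1 := by omega
      have e2 : k.toNat + (m + 1) - k.toNat = m + 1 := by omega
      rw [e1, e2]
      ring
    refine ⟨hS', by rw [if_neg (by omega)]; exact hvalF, ?_, ?_⟩
    · show (if (k + 1 + (m : Int)) < n - k then PySem.List.pySetD st.1.1 (k + 1 + (m : Int)) _
            else st.1.1).length = (n - k).toNat
      by_cases hstore : (k + 1 + (m : Int)) < n - k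
      · rw [if_pos hstore, PySem.List.pySetD_of_nonneg _ _ (by omega), List.length_set]
        exact hL
      · rw [if_neg hstore]
        exact hL
    intro j hj hjD
    show (if (k + 1 + (m : Int)) < n - k then PySem.List.pySetD st.1.1 (k + 1 + (m : Int)) _
          else st.1.1)[j]? = some (pvF k j)
    have hidx : (k + 1 + (m : Int)).toNat = k.toNat + 1 + m := by omega
    by_cases hstore : (k + 1 + (m : Int)) < n - k
    · rw [if_pos hstore, PySem.List.pySetD_of_nonneg _ _ (by omega), List.getElem?_set]
      by_cases hjt : j = k.toNat + 1 + m
      · rw [if_pos (by omega), if_pos (by rw [hidx, hL]; omega)]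
        subst hjt
        rw [show k.toNat + 1 + m = k.toNat + (m + 1) from by omega]
        exact congrArg some hvalF
      · rw [if_neg (by omega)]
        exact hE j (by omega) hjD
    · rw [if_neg hstore]
      have : j ≤ k.toNat + m := by omega
      exact hE j this hjD

theorem pvB_eq (n k : Int) (hk : 0 ≤ k) (hn : k < n) :
    num_max_continue_string_alt n k = pvF k n.toNat := by
  unfold num_max_continue_string_alt
  rw [if_neg (by omega), if_neg (by omega)]
  have hend : (n + 1 : Int) = k + 1 + ((n.toNat - k.toNat : Nat) : Int) := by omega
  obtain ⟨hS, hlast, hL, hE⟩ := pvB_loop n k hk hn (n.toNat - k.toNat) le_rfl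
  rw [← hend] at hlast
  rw [hlast, if_neg (by omega)]
  congr 1
  omega

-- ===== VERDICT (by name: the statement is the Claim_ definition above) =====
theorem num_max_continue_string_spec : Claim_equal_num_max_continue_string := by
  intro n k _ hpre
  unfold Pre_num_max_continue_string at hpre
  unfold Spec_num_max_continue_string
  obtain ⟨f, hfu⟩ : ∃ f, n.toNat + 2 = f + 1 := ⟨n.toNat + 1, rfl⟩
  by_cases h1 : n < k
  · unfold num_max_continue_string num_max_continue_string_alt
    rw [hfu, pvAgo, if_pos h1, if_pos h1]
  by_cases h2 : n = k
  · unfold num_max_continue_string num_max_continue_string_alt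
    rw [hfu, pvAgo, if_neg h1, if_pos h2, if_neg h1, if_pos h2]
  · have hk : 0 ≤ k := by rcases hpre with h | h <;> omega
    have hkn : k < n := by omega
    have hn : 0 ≤ n := by omega
    have hinv0 : pvInv k (List.replicate (n + 1).toNat 0) := by
      intro j v hj hv
      rw [List.getElem?_replicate] at hj
      by_cases hjl : j < (n + 1).toNat
      · rw [if_pos hjl] at hj; injection hj with h; exact absurd h.symm hv
      · rw [if_neg hjl] at hj; exact absurd hj (by simp)
    have hA := (pvAgo_correct k hk (n.toNat + 2) n (List.replicate (n + 1).toNat 0) hn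
      (by omega) hinv0).1
    unfold num_max_continue_string
    rw [hA, pvB_eq n k hk hkn]
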